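-- pv_equiv track=rewrite | github.com/hay86/leetcode | 301-400/321.py | dp2
-- ===== SOURCE A (Python) =====
-- def dp2(d1, d2):
--     ret, i1, i2, s1, s2 = '', 0, 0, len(d1), len(d2)
--     while i1 < s1 and i2 < s2:
--         if d1[i1] > d2[i2]:
--             ret += d1[i1]
--             i1 += 1
--         elif d1[i1] < d2[i2]:
--             ret += d2[i2]
--             i2 += 1
--         else:
--             j1, j2 = i1+1, i2+1
--             while j1 < s1 and j2 < s2 and d1[j1] == d2[j2]:
--                 j1 += 1
--                 j2 += 1
--             if j1 == s1 or j2 < s2 and d1[j1] < d2[j2]: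
--                 ret += d2[i2]
--                 i2 += 1
--             else:
--                 ret += d1[i1]
--                 i1 += 1
--     if i1 < s1:
--         ret += d1[i1:]
--     if i2 < s2:
--         ret += d2[i2:]
--     return ret
-- ===== SOURCE B (Python) =====
-- def dp2(d1, d2):
--     # Greedy over suffixes: take from whichever remaining string is
--     # lexicographically larger (ties go to d2, which matches the scan-based
--     # tie-break in the original).
--     out = []
--     while d1 and d2:
--         if d1 > d2:
--             out.append(d1[0])
--             d1 = d1[1:]
--         else:
--             out.append(d2[0])
--             d2 = d2[1:]
--     return ''.join(out) + d1 + d2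
-- ===== Notes on version B (the rewrite author's own statement) =====
-- stated objective: simpler
-- what changed: A walks two indices and hand-rolls an inner equal-prefix scan to break ties; B is a plain greedy recursion on the two remaining suffixes that always takes the head of the lexicographically larger suffix (one string comparison replaces the index bookkeeping and the explicit tie-break scan).
import Mathlib
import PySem

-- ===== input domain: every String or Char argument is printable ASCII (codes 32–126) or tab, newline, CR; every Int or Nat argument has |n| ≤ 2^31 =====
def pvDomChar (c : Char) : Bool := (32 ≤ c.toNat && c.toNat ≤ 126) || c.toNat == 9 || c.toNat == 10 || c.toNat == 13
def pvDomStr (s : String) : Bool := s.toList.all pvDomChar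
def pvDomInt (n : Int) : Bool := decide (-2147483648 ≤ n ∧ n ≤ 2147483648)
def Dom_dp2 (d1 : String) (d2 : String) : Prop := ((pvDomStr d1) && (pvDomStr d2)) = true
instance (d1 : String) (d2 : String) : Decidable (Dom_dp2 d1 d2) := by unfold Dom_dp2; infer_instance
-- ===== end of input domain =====

-- B replaces A's index loop with hand-rolled tie-break scan by a greedy recursion on the
-- two suffixes that picks from the lexicographically larger one (objective: simpler).

-- ===== PORT A =====
-- inner 'while j1 < s1 and j2 < s2 and d1[j1] == d2[j2]' scan of A's tie branch
def dp2Scan (l1 l2 : List Char) (j1 j2 : Nat) : Nat × Nat :=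
  if _h : j1 < l1.length ∧ j2 < l2.length ∧ l1.getD j1 ' ' = l2.getD j2 ' ' then
    dp2Scan l1 l2 (j1 + 1) (j2 + 1)
  else (j1, j2)
termination_by l1.length - j1

-- A's main 'while i1 < s1 and i2 < s2' loop; indexing d1[i1] is in range under the guard,
-- so List.getD with a dummy default is exact; ret += c becomes cons on the recursive call.
def dp2Loop (l1 l2 : List Char) (i1 i2 : Nat) : List Char :=
  if _h : i1 < l1.length ∧ i2 < l2.length then
    if l2.getD i2 ' ' < l1.getD i1 ' ' then
      l1.getD i1 ' ' :: dp2Loop l1 l2 (i1 + 1) i2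
    else if l1.getD i1 ' ' < l2.getD i2 ' ' then
      l2.getD i2 ' ' :: dp2Loop l1 l2 i1 (i2 + 1)
    else
      let p := dp2Scan l1 l2 (i1 + 1) (i2 + 1)
      if p.1 = l1.length ∨ (p.2 < l2.length ∧ l1.getD p.1 ' ' < l2.getD p.2 ' ') then
        l2.getD i2 ' ' :: dp2Loop l1 l2 i1 (i2 + 1)
      else
        l1.getD i1 ' ' :: dp2Loop l1 l2 (i1 + 1) i2
  else
    -- trailing 'if i1 < s1: ret += d1[i1:]' / 'if i2 < s2: ret += d2[i2:]' (drop past the end is [])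
    l1.drop i1 ++ l2.drop i2
termination_by (l1.length - i1) + (l2.length - i2)

def dp2 (d1 : String) (d2 : String) : String :=
  String.ofList (dp2Loop d1.toList d2.toList 0 0)

-- ===== PORT B =====
-- Source B's 'while d1 and d2' loop on the two remaining suffixes; Python's 'd1 > d2' on str is
-- exactly '<' on the char lists (code-point lexicographic)
def dp2AltLoop : List Char → List Char → List Char
  | [], l2 => l2
  | a :: l1, [] => a :: l1
  | a :: l1, b :: l2 =>
    if b :: l2 < a :: l1 then a :: dp2AltLoop l1 (b :: l2)
    else b :: dp2AltLoop (a :: l1) l2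

def dp2_alt (d1 : String) (d2 : String) : String :=
  String.ofList (dp2AltLoop d1.toList d2.toList)

-- ===== PRECONDITION & SPEC =====
def Spec_dp2 (d1 : String) (d2 : String) (out : String) : Prop := out = dp2_alt d1 d2
instance (d1 : String) (d2 : String) (out : String) : Decidable (Spec_dp2 d1 d2 out) := by unfold Spec_dp2; infer_instance

-- ===== CLAIM (what is proved, stated in full; the proofs are below) =====
def Claim_equal_dp2 : Prop := ∀ (d1 : String) (d2 : String), Dom_dp2 d1 d2 → Spec_dp2 d1 d2 (dp2 d1 d2)

-- ===== LEMMAS AND PROOFS =====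

-- A's tie-break scan decides exactly whether the d2-suffix is NOT below the d1-suffix
theorem dp2Scan_cond (l1 l2 : List Char) (j1 j2 : Nat) (hj1 : j1 ≤ l1.length) :
    ((dp2Scan l1 l2 j1 j2).1 = l1.length ∨
      ((dp2Scan l1 l2 j1 j2).2 < l2.length ∧
        l1.getD (dp2Scan l1 l2 j1 j2).1 ' ' < l2.getD (dp2Scan l1 l2 j1 j2).2 ' ')) ↔
    ¬ (l2.drop j2 < l1.drop j1) := by
  revert hj1
  induction j1, j2 using dp2Scan.induct l1 l2 with
  | case1 j1 j2 h ih =>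
    intro hj1
    obtain ⟨h1, h2, he⟩ := h
    have hstep : dp2Scan l1 l2 j1 j2 = dp2Scan l1 l2 (j1 + 1) (j2 + 1) := by
      rw [dp2Scan]; exact dif_pos ⟨h1, h2, he⟩
    rw [hstep]
    rw [List.drop_eq_getElem_cons h1, List.drop_eq_getElem_cons h2]
    rw [List.getD_eq_getElem l1 ' ' h1, List.getD_eq_getElem l2 ' ' h2] at he
    rw [List.cons_lt_cons_iff]
    simp only [he, lt_irrefl, false_or, true_and]
    exact ih (by omega)
  | case2 j1 j2 h =>
    intro hj1
    have hstep : dp2Scan l1 l2 j1 j2 = (j1, j2) := by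
      rw [dp2Scan]; exact dif_neg h
    rw [hstep]
    dsimp only
    push_neg at h
    by_cases h1 : j1 < l1.length
    · have h2 := h h1
      by_cases h2' : j2 < l2.length
      · have hne : l1.getD j1 ' ' ≠ l2.getD j2 ' ' := h2 h2'
        rw [List.drop_eq_getElem_cons h1, List.drop_eq_getElem_cons h2']
        rw [List.getD_eq_getElem l1 ' ' h1, List.getD_eq_getElem l2 ' ' h2'] at hne ⊢
        rw [List.cons_lt_cons_iff]
        constructor
        · rintro (hc | ⟨_, hc⟩)
          · omega
          · rintro (hlt | ⟨heq, _⟩)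
            · exact absurd (lt_trans hlt hc) (lt_irrefl _)
            · exact hne heq.symm
        · intro hnl
          refine Or.inr ⟨h2', ?_⟩
          rcases lt_trichotomy (l1[j1]) (l2[j2]) with hlt | heq | hgt
          · exact hlt
          · exact absurd heq hne
          · exact absurd (Or.inl hgt) hnl
      · have hd2 : l2.drop j2 = [] := List.drop_eq_nil_of_le (by omega)
        rw [hd2]
        rcases hx : l1.drop j1 with _ | ⟨a, x⟩
        · exfalso
          have := List.drop_eq_nil_iff.mp hx
          omega
        · simp only [List.nil_lt_cons, not_true_eq_false, iff_false]
          rintro (hj | ⟨hj2, _⟩) <;> omega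
    · have hd1 : l1.drop j1 = [] := List.drop_eq_nil_of_le (by omega)
      rw [hd1]
      simp [List.not_lt_nil]
      exact Or.inl (by omega)

-- main loop correspondence: A's indexed loop computes B's greedy merge of the suffixes
theorem dp2Loop_eq (l1 l2 : List Char) (i1 i2 : Nat) :
    dp2Loop l1 l2 i1 i2 = dp2AltLoop (l1.drop i1) (l2.drop i2) := by
  fun_induction dp2Loop l1 l2 i1 i2 with
  | case1 i1 i2 h hgt ih =>
    obtain ⟨h1, h2⟩ := h
    rw [List.getD_eq_getElem l2 ' ' h2] at hgt
    rw [List.getD_eq_getElem l1 ' ' h1] at hgt ⊢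
    rw [List.drop_eq_getElem_cons h1, List.drop_eq_getElem_cons h2, dp2AltLoop]
    rw [if_pos (by rw [List.cons_lt_cons_iff]; exact Or.inl hgt)]
    rw [ih, List.drop_eq_getElem_cons h2]
  | case2 i1 i2 h hgt hlt ih =>
    obtain ⟨h1, h2⟩ := h
    rw [List.getD_eq_getElem l1 ' ' h1] at hlt
    rw [List.getD_eq_getElem l2 ' ' h2] at hlt ⊢
    rw [List.drop_eq_getElem_cons h1, List.drop_eq_getElem_cons h2, dp2AltLoop]
    rw [if_neg (by
      rw [List.cons_lt_cons_iff]
      rintro (hc | ⟨heq, _⟩)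
      · exact absurd (lt_trans hc hlt) (lt_irrefl _)
      · rw [heq] at hlt; exact absurd hlt (lt_irrefl _))]
    rw [ih, List.drop_eq_getElem_cons h1]
  | case3 i1 i2 h hgt hlt p hc ih =>
    obtain ⟨h1, h2⟩ := h
    have heq : l1.getD i1 ' ' = l2.getD i2 ' ' := le_antisymm (not_lt.mp hgt) (not_lt.mp hlt)
    have hcond := (dp2Scan_cond l1 l2 (i1 + 1) (i2 + 1) (by omega)).mp hc
    rw [List.getD_eq_getElem l1 ' ' h1, List.getD_eq_getElem l2 ' ' h2] at heq
    rw [List.getD_eq_getElem l2 ' ' h2] at ⊢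
    rw [List.drop_eq_getElem_cons h1, List.drop_eq_getElem_cons h2, dp2AltLoop]
    rw [if_neg (by
      rw [List.cons_lt_cons_iff]
      rintro (hc' | ⟨_, hc'⟩)
      · rw [heq] at hc'; exact absurd hc' (lt_irrefl _)
      · exact hcond hc')]
    rw [ih, List.drop_eq_getElem_cons h1]
  | case4 i1 i2 h hgt hlt p hc ih =>
    obtain ⟨h1, h2⟩ := h
    have heq : l1.getD i1 ' ' = l2.getD i2 ' ' := le_antisymm (not_lt.mp hgt) (not_lt.mp hlt)
    have hcond : l2.drop (i2 + 1) < l1.drop (i1 + 1) := by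
      by_contra hn
      exact hc ((dp2Scan_cond l1 l2 (i1 + 1) (i2 + 1) (by omega)).mpr hn)
    rw [List.getD_eq_getElem l1 ' ' h1, List.getD_eq_getElem l2 ' ' h2] at heq
    rw [List.getD_eq_getElem l1 ' ' h1] at ⊢
    rw [List.drop_eq_getElem_cons h1, List.drop_eq_getElem_cons h2, dp2AltLoop]
    rw [if_pos (by rw [List.cons_lt_cons_iff]; exact Or.inr ⟨heq.symm, hcond⟩)]
    rw [ih, List.drop_eq_getElem_cons h2]
  | case5 i1 i2 h =>
    push_neg at h
    by_cases h1 : i1 < l1.length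
    · have hd2 : l2.drop i2 = [] := List.drop_eq_nil_of_le (by omega)
      rw [hd2]
      rcases hx : l1.drop i1 with _ | ⟨a, x⟩
      · simp [dp2AltLoop]
      · simp [dp2AltLoop]
    · have hd1 : l1.drop i1 = [] := List.drop_eq_nil_of_le (by omega)
      rw [hd1]
      simp [dp2AltLoop]

-- ===== VERDICT (by name: the statement is the Claim_ definition above) =====
theorem dp2_spec : Claim_equal_dp2 := by
  intro d1 d2 _
  unfold Spec_dp2 dp2 dp2_alt
  rw [dp2Loop_eq]
  simp
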